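-- pv_equiv track=rewrite | github.com/mkosemes/True-Osint | modules/social_accounts.py | _dedupe_accounts
-- ===== SOURCE A (Python) =====
-- CONFIDENCE_SCORE = {"high": 3, "medium": 2, "low": 1}
--
-- def _dedupe_accounts(accounts):
--     by_url = {}
--     for account in accounts:
--         url = account["url"]
--         existing = by_url.get(url)
--         if not existing:
--             by_url[url] = account
--             continue
--         if CONFIDENCE_SCORE.get(account.get("confidence", "low"), 1) > CONFIDENCE_SCORE.get(
--             existing.get("confidence", "low"), 1
--         ):
--             by_url[url] = account
--
--     return sorted(
--         by_url.values(),
--         key=lambda item: CONFIDENCE_SCORE.get(item.get("confidence", "low"), 1),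
--         reverse=True,
--     )
-- ===== SOURCE B (Python) =====
-- CONFIDENCE_SCORE = {"high": 3, "medium": 2, "low": 1}
--
-- def _dedupe_accounts(accounts):
--     def score(a):
--         return CONFIDENCE_SCORE.get(a.get("confidence", "low"), 1)
--     groups = {}
--     for account in accounts:
--         url = account["url"]
--         if url in groups:
--             groups[url] = groups[url] + [account]
--         else:
--             groups[url] = [account]
--     best = [max(g, key=score) for g in groups.values()]
--     return sorted(best, key=score, reverse=True)
-- ===== Notes on version B (the rewrite author's own statement) =====
-- stated objective: alternative
-- what changed: A streams through accounts keeping one running-best account per URL in a dict; B first builds a per-URL grouping index (url -> list of accounts in order), then reduces each group with max(g, key=score) (Python's max keeps the first maximal element, matching A's strict-> first-wins tie rule) and sorts the reduced list; Pre_ excludes accounts missing the 'url' key, on which A raises KeyError (B raises the same KeyError).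
import Mathlib
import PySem

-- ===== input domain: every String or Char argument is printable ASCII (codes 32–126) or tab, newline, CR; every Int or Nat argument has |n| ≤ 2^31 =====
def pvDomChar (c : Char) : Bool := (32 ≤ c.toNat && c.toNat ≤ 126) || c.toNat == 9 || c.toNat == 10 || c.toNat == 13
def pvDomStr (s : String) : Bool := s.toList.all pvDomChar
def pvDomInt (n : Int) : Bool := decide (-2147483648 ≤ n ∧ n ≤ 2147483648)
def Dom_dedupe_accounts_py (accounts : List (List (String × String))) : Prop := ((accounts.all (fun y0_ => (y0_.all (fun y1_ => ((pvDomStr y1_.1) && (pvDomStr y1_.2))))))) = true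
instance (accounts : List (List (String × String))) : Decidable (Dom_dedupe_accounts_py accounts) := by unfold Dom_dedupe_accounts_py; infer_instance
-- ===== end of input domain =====

-- B replaces A's streaming running-best per URL by a group-then-reduce decomposition
-- (build per-URL groups, take the first maximum of each group, then sort); same cost, alternative structure.

-- CONFIDENCE_SCORE = {"high": 3, "medium": 2, "low": 1}
def pvCONFIDENCE_SCORE : PySem.Dict String Int :=
  PySem.Dict.ofList [("high", 3), ("medium", 2), ("low", 1)]

-- CONFIDENCE_SCORE.get(a.get("confidence", "low"), 1) — the key used by both Pythons
def pvScore (a : List (String × String)) : Int :=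
  pvCONFIDENCE_SCORE.getD ((PySem.Dict.ofList a).getD "confidence" "low") 1

-- ===== PORT A =====
-- loop body of A: url = account["url"] (total here via getD; Pre_ guarantees the key);
-- 'if not existing' = existing is None or the empty dict
def pvStepA (d : PySem.Dict String (List (String × String))) (account : List (String × String)) :
    PySem.Dict String (List (String × String)) :=
  let url := (PySem.Dict.ofList account).getD "url" ""
  match d.get? url with
  | none => d.insert url account
  | some existing =>
    if existing.isEmpty then d.insert url account
    else if pvScore account > pvScore existing then d.insert url account else d

def dedupe_accounts_py (accounts : List (List (String × String))) : List (List (String × String)) :=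
  let by_url := accounts.foldl pvStepA PySem.Dict.empty
  PySem.List.sorted by_url.values pvScore true

-- ===== PORT B =====
-- max(g, key=score): Python's max returns the FIRST maximal element = PySem.List.max?
def pvBest (g : List (List (String × String))) : List (String × String) :=
  (PySem.List.max? g pvScore).getD []

-- loop body of B: append account to its URL's group
def pvStepB (d : PySem.Dict String (List (List (String × String)))) (account : List (String × String)) :
    PySem.Dict String (List (List (String × String))) :=
  let url := (PySem.Dict.ofList account).getD "url" ""
  if d.contains url then d.insert url (d.getD url [] ++ [account]) else d.insert url [account]

def dedupe_accounts_py_alt (accounts : List (List (String × String))) : List (List (String × String)) :=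
  let groups := accounts.foldl pvStepB PySem.Dict.empty
  let best := groups.values.map pvBest
  PySem.List.sorted best pvScore true

-- ===== PRECONDITION & SPEC =====
-- Pre_ excludes accounts missing the "url" key, on which A raises KeyError (B raises the same KeyError there).
def Pre_dedupe_accounts_py (accounts : List (List (String × String))) : Prop :=
  (accounts.all (fun a => a.any (fun p => p.1 == "url"))) = true
instance (accounts : List (List (String × String))) : Decidable (Pre_dedupe_accounts_py accounts) := by
  unfold Pre_dedupe_accounts_py; infer_instance

def pvWitness_dedupe_accounts_py : (List (List (String × String))) :=
  [[("url", "https://a.example/x"), ("confidence", "high")], [("url", "https://a.example/x")]]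

def Spec_dedupe_accounts_py (accounts : List (List (String × String))) (out : List (List (String × String))) : Prop := out = dedupe_accounts_py_alt accounts
instance (accounts : List (List (String × String))) (out : List (List (String × String))) : Decidable (Spec_dedupe_accounts_py accounts out) := by unfold Spec_dedupe_accounts_py; infer_instance

-- ===== CLAIM (what is proved, stated in full; the proofs are below) =====
def Claim_equal_dedupe_accounts_py : Prop := ∀ (accounts : List (List (String × String))), Dom_dedupe_accounts_py accounts → Pre_dedupe_accounts_py accounts → Spec_dedupe_accounts_py accounts (dedupe_accounts_py accounts)

-- ===== LEMMAS AND PROOFS =====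

-- the reduction applied to each group's entry
def pvF (p : String × List (List (String × String))) : String × List (String × String) :=
  (p.1, pvBest p.2)

lemma pvBest_singleton (a : List (String × String)) : pvBest [a] = a := rfl

lemma pvBest_append (g : List (List (String × String))) (a : List (String × String)) (hg : g ≠ []) :
    pvBest (g ++ [a]) = if pvScore (pvBest g) < pvScore a then a else pvBest g := by
  cases hm : PySem.List.max? g pvScore with
  | none => exact absurd ((PySem.List.max?_eq_none_iff g pvScore).1 hm) hg
  | some m =>
    have hstep : PySem.List.max? (g ++ [a]) pvScore =
        if pvScore m < pvScore a then some a else some m := by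
      simp only [PySem.List.max?] at hm ⊢
      rw [List.foldl_append, hm]
      simp only [List.foldl_cons, List.foldl_nil]
    unfold pvBest
    rw [hstep, hm]
    simp only [Option.getD_some]
    split_ifs <;> simp

-- first-match lookup through the entry-wise map pvF
lemma get?_mk_map (l : List (String × List (List (String × String)))) (u : String) :
    (PySem.Dict.mk (l.map pvF)).get? u = ((PySem.Dict.mk l).get? u).map pvBest := by
  induction l with
  | nil => simp [PySem.Dict.get?]
  | cons p t ih =>
    obtain ⟨k, v⟩ := p
    simp only [List.map_cons, pvF, PySem.Dict.get?_mk_cons]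
    split_ifs with h <;> simp [ih]

lemma get?_rel (db : PySem.Dict String (List (String × String)))
    (dg : PySem.Dict String (List (List (String × String))))
    (hrel : db.items = dg.items.map pvF) (u : String) :
    db.get? u = (dg.get? u).map pvBest := by
  have h1 : db = PySem.Dict.mk (dg.items.map pvF) := PySem.Dict.ext hrel
  have h2 : dg = PySem.Dict.mk dg.items := PySem.Dict.ext rfl
  rw [h1, get?_mk_map, ← h2]

-- the main loop invariant: the bests dict of A is the entry-wise reduction of B's groups dict
lemma loop_rel (l : List (List (String × String)))
    (db : PySem.Dict String (List (String × String)))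
    (dg : PySem.Dict String (List (List (String × String))))
    (hnd : dg.keys.Nodup)
    (hrel : db.items = dg.items.map pvF)
    (hne : ∀ p ∈ db.items, p.2 ≠ [])
    (hl : ∀ a ∈ l, (a.any (fun p => p.1 == "url")) = true) :
    (l.foldl pvStepA db).items = (l.foldl pvStepB dg).items.map pvF := by
  induction l generalizing db dg with
  | nil => simpa using hrel
  | cons a t ih =>
    have ha : a.any (fun p => p.1 == "url") = true := hl a (List.mem_cons_self)
    have hane : a ≠ [] := by rintro rfl; simp at ha
    have ht : ∀ b ∈ t, (b.any (fun p => p.1 == "url")) = true :=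
      fun b hb => hl b (List.mem_cons_of_mem a hb)
    simp only [List.foldl_cons]
    have hget := get?_rel db dg hrel ((PySem.Dict.ofList a).getD "url" "")
    simp only [pvStepA, pvStepB]
    set u := (PySem.Dict.ofList a).getD "url" "" with hu
    cases hg : dg.get? u with
    | none =>
      have hdbg : db.get? u = none := by rw [hget, hg]; rfl
      have hcg : dg.contains u = false := (PySem.Dict.get?_eq_none_iff_contains dg u).1 hg
      have hcb : db.contains u = false := (PySem.Dict.get?_eq_none_iff_contains db u).1 hdbg
      rw [hdbg, hcg]
      simp only [Bool.false_eq_true, if_false]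
      apply ih (db.insert u a) (dg.insert u [a])
      · exact PySem.Dict.nodup_keys_insert dg u [a] hnd
      · rw [PySem.Dict.items_insert_of_not_contains db a hcb,
            PySem.Dict.items_insert_of_not_contains dg [a] hcg]
        simp [hrel, pvF, pvBest_singleton]
      · intro p hp
        rw [PySem.Dict.items_insert_of_not_contains db a hcb] at hp
        rcases List.mem_append.1 hp with h | h
        · exact hne p h
        · simp at h; subst h; exact hane
      · exact ht
    | some g =>
      have hdbg : db.get? u = some (pvBest g) := by rw [hget, hg]; rfl
      have hcg : dg.contains u = true := by
        cases hc : dg.contains u with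
        | false => rw [(PySem.Dict.get?_eq_none_iff_contains dg u).2 hc] at hg; cases hg
        | true => rfl
      have hcb : db.contains u = true := by
        cases hc : db.contains u with
        | false => rw [(PySem.Dict.get?_eq_none_iff_contains db u).2 hc] at hdbg; cases hdbg
        | true => rfl
      have hbne : pvBest g ≠ [] :=
        hne (u, pvBest g) (PySem.Dict.mem_items_of_get?_eq_some db hdbg)
      have hgne : g ≠ [] := by
        rintro rfl; exact hbne rfl
      have hemp : (pvBest g).isEmpty = false := by
        cases h : (pvBest g).isEmpty
        · rfl
        · exact absurd (List.isEmpty_iff.1 h) hbne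
      have hgd : dg.getD u [] = g := PySem.Dict.getD_of_get?_eq_some dg [] hg
      rw [hdbg, hcg, hgd]
      simp only [if_true, hemp, Bool.false_eq_true, if_false]
      by_cases hcmp : pvScore a > pvScore (pvBest g)
      · rw [if_pos hcmp]
        apply ih (db.insert u a) (dg.insert u (g ++ [a]))
        · exact PySem.Dict.nodup_keys_insert dg u (g ++ [a]) hnd
        · rw [PySem.Dict.items_insert_of_contains db a hcb,
              PySem.Dict.items_insert_of_contains dg (g ++ [a]) hcg,
              hrel, List.map_map, List.map_map]
          apply List.map_congr_left
          intro p _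
          by_cases h : p.1 = u
          · simp [Function.comp, pvF, h, pvBest_append g a hgne, hcmp]
          · simp [Function.comp, pvF, h]
        · intro p hp
          rw [PySem.Dict.items_insert_of_contains db a hcb] at hp
          rcases List.mem_map.1 hp with ⟨q, hq, hqe⟩
          by_cases h : q.1 = u
          · simp [h] at hqe; subst hqe; exact hane
          · simp [h] at hqe; subst hqe; exact hne q hq
        · exact ht
      · rw [if_neg hcmp]
        apply ih db (dg.insert u (g ++ [a]))
        · exact PySem.Dict.nodup_keys_insert dg u (g ++ [a]) hnd
        · rw [PySem.Dict.items_insert_of_contains dg (g ++ [a]) hcg,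
              List.map_map, hrel]
          apply List.map_congr_left
          intro p hp
          by_cases h : p.1 = u
          · have hp2 : p.2 = g := by
              have hmem : (u, p.2) ∈ dg.items := by
                have : p = (u, p.2) := by rw [← h]
                rwa [← this]
              have := PySem.Dict.get?_of_mem_items dg hmem hnd
              rw [hg] at this
              exact (Option.some.inj this).symm
            simp [Function.comp, pvF, h, hp2, pvBest_append g a hgne, hcmp]
          · simp [Function.comp, pvF, h]
        · exact hne
        · exact ht

theorem pv_main (accounts : List (List (String × String)))
    (hpre : Pre_dedupe_accounts_py accounts) :
    dedupe_accounts_py accounts = dedupe_accounts_py_alt accounts := by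
  unfold dedupe_accounts_py dedupe_accounts_py_alt
  have hl : ∀ a ∈ accounts, (a.any (fun p => p.1 == "url")) = true :=
    fun a haa => List.all_eq_true.1 hpre a haa
  have h := loop_rel accounts PySem.Dict.empty PySem.Dict.empty
    (by simp [PySem.Dict.keys_empty]) (by simp [PySem.Dict.empty]) (by simp [PySem.Dict.empty]) hl
  have hv : (accounts.foldl pvStepA PySem.Dict.empty).values
      = ((accounts.foldl pvStepB PySem.Dict.empty).values.map pvBest) := by
    simp only [PySem.Dict.values]
    rw [h, List.map_map, List.map_map]
    rfl
  show PySem.List.sorted (List.foldl pvStepA PySem.Dict.empty accounts).values pvScore true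
      = PySem.List.sorted (List.map pvBest (List.foldl pvStepB PySem.Dict.empty accounts).values) pvScore true
  rw [hv]

-- ===== VERDICT (by name: the statement is the Claim_ definition above) =====
theorem dedupe_accounts_py_spec : Claim_equal_dedupe_accounts_py := by
  intro accounts _ hpre
  unfold Spec_dedupe_accounts_py
  exact pv_main accounts hpre
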